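-- pv_equiv track=rewrite | github.com/RomoloDef/Informatica-Triennale | 1° Anno/Fondamenti di Programmazione/2023-2024/Homework/HW6rec/program01.py | ricerca_rettangoli_neri
-- ===== SOURCE A (Python) =====
-- def rettangolo_nero(immagine, i, j, b, h):
--     for x in range(i, i + h):
--         for y in range(j, j + b):
--             pixel = immagine[x][y]
--             if pixel != (0, 0, 0):
--                 return False
--     return True
--
-- def crea_rettangolo(i, j, b, h):
--     vertice_superiore_sinistro = (i, j)
--     vertice_superiore_destro = (i, j + b - 1)
--     vertice_inferiore_sinistro = (i + h - 1, j)
--     vertice_inferiore_destro = (i + h - 1, j + b - 1)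
--     return {
--         "VerticeSuperioreSinistro": vertice_superiore_sinistro,
--         "VerticeSuperioreDestro": vertice_superiore_destro,
--         "VerticeInferioreSinistro": vertice_inferiore_sinistro,
--         "VerticeInferioreDestro": vertice_inferiore_destro
--     }
--
-- def ricerca_rettangoli_neri(immagine, b, h, distanza):
--     atterraggi = False
--     rettangoli = {}
--
--     for i in range(len(immagine) - h + 1):
--         for j in range(len(immagine[0]) - b + 1):
--             if rettangolo_nero(immagine, i, j, b, h):
--                 if (j >= distanza) and (j + b - 1 <= len(immagine[0]) - distanza - 1):
--                     atterraggi = True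
--                     nome_rettangolo = f"rettangolo_{i}_{j}"
--                     rettangoli[nome_rettangolo] = crea_rettangolo(i, j, b, h)
--
--     return atterraggi, rettangoli
-- ===== SOURCE B (Python) =====
-- def crea_rettangolo(i, j, b, h):
--     return {
--         "VerticeSuperioreSinistro": (i, j),
--         "VerticeSuperioreDestro": (i, j + b - 1),
--         "VerticeInferioreSinistro": (i + h - 1, j),
--         "VerticeInferioreDestro": (i + h - 1, j + b - 1),
--     }
--
-- def ricerca_rettangoli_neri(immagine, b, h, distanza):
--     N = len(immagine)
--     W = len(immagine[0]) if immagine else 0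
--     if b >= 1 and h >= 1:
--         # one pass: per-row prefix counts of non-black pixels; a candidate
--         # rectangle is then tested with one O(1) subtraction per row
--         R = []
--         for row in immagine:
--             cur = [0]
--             for j in range(W):
--                 cur.append(cur[j] + (row[j] != (0, 0, 0)))
--             R.append(cur)
--         def nero(i, j):
--             return all(R[x][j + b] == R[x][j] for x in range(i, i + h))
--     else:
--         def nero(i, j):
--             return True  # empty rectangle is vacuously all-black
--     rettangoli = {}
--     for i in range(N - h + 1):
--         for j in range(W - b + 1):
--             if nero(i, j) and j >= distanza and j + b - 1 <= W - distanza - 1: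
--                 rettangoli[f"rettangolo_{i}_{j}"] = crea_rettangolo(i, j, b, h)
--     return bool(rettangoli), rettangoli
-- ===== Notes on version B (the rewrite author's own statement) =====
-- stated objective: alternative
-- what changed: B precomputes per-row prefix counts of non-black pixels in one pass and tests each candidate rectangle with one O(1) subtraction per row instead of A's per-position b*h pixel scan, and derives the found-flag from the dict instead of tracking it separately.
-- outside the precondition, e.g. on ricerca_rettangoli_neri([[(1, 1, 1), (1, 1, 1)], [(1, 1, 1)]], 2, 1, 0): A returns (False, {}), B raises IndexError
import Mathlib
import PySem

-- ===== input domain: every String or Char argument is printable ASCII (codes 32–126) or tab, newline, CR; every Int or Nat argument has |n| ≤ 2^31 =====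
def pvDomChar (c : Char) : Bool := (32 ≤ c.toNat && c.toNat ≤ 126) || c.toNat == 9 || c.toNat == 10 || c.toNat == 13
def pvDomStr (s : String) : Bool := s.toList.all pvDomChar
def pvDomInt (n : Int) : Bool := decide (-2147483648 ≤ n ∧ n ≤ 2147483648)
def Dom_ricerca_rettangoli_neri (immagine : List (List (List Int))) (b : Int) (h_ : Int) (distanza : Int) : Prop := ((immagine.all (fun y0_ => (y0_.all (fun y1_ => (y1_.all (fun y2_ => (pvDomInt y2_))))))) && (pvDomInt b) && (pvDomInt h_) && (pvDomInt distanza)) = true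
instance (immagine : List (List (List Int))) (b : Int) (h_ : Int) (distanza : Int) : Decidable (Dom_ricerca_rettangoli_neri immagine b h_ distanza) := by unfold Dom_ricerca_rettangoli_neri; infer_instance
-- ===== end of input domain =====

-- B replaces A's per-position pixel scan by one pass of per-row prefix counts of
-- non-black pixels, testing each candidate rectangle with one O(1) subtraction per
-- row, and derives the flag from the dict instead of tracking it separately.

-- ===== PORT A =====

-- Python `d[k] = v` on the association-list representation of a dict:
-- overwrite keeps the position, a new key appends (exact).
def dictSet {V : Type} (d : List (String × V)) (k : String) (v : V) : List (String × V) :=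
  match d with
  | [] => [(k, v)]
  | p :: t => if p.1 = k then (k, v) :: t else p :: dictSet t k v

-- `for y in range(j, j + b): pixel = immagine[x][y]; if pixel != (0, 0, 0): return False`
-- (the early `return False` is propagated as false; the indexing is exact under
-- Pre_, which keeps every touched index in range)
def rn_loopY (immagine : List (List (List Int))) (x : Int) : List Int → Bool
  | [] => true
  | y :: ys =>
    let pixel := PySem.List.pyGetD (PySem.List.pyGetD immagine x []) y []
    if pixel ≠ [0, 0, 0] then false else rn_loopY immagine x ys

-- `for x in range(i, i + h): …`
def rn_loopX (immagine : List (List (List Int))) (j b : Int) : List Int → Bool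
  | [] => true
  | x :: xs =>
    if rn_loopY immagine x (PySem.List.pyRange j (j + b) 1) then rn_loopX immagine j b xs
    else false

def rettangolo_nero (immagine : List (List (List Int))) (i j b h : Int) : Bool :=
  rn_loopX immagine j b (PySem.List.pyRange i (i + h) 1)

def crea_rettangolo (i j b h : Int) : List (String × Int × Int) :=
  [("VerticeSuperioreSinistro", (i, j)),
   ("VerticeSuperioreDestro", (i, j + b - 1)),
   ("VerticeInferioreSinistro", (i + h - 1, j)),
   ("VerticeInferioreDestro", (i + h - 1, j + b - 1))]

-- `len(immagine[0])` is ported as (immagine.headD []).length: Python evaluates it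
-- only when the outer loop runs, where Pre_ guarantees immagine ≠ [].
def ricerca_rettangoli_neri (immagine : List (List (List Int))) (b : Int) (h_ : Int) (distanza : Int) : Bool × (List (String × List (String × Int × Int))) :=
  (PySem.List.pyRange 0 ((immagine.length : Int) - h_ + 1) 1).foldl
    (fun s i =>
      (PySem.List.pyRange 0 (((immagine.headD []).length : Int) - b + 1) 1).foldl
        (fun s j =>
          if rettangolo_nero immagine i j b h_ then
            if decide (j ≥ distanza) && decide (j + b - 1 ≤ ((immagine.headD []).length : Int) - distanza - 1) then
              (true, dictSet s.2 ("rettangolo_" ++ PySem.Int.toStr i ++ "_" ++ PySem.Int.toStr j) (crea_rettangolo i j b h_))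
            else s
          else s) s)
    (false, ([] : List (String × List (String × Int × Int))))

-- ===== PORT B =====

-- `cur = [0]; for j in range(W): cur.append(cur[j] + (row[j] != (0,0,0)))`
def buildRow (W : Int) (row : List (List Int)) : List Int :=
  (PySem.List.pyRange 0 W 1).foldl
    (fun cur j =>
      cur ++ [PySem.List.pyGetD cur j 0 +
              (if PySem.List.pyGetD row j ([] : List Int) ≠ [0, 0, 0] then (1 : Int) else 0)])
    [0]

def ricerca_rettangoli_neri_alt (immagine : List (List (List Int))) (b : Int) (h_ : Int) (distanza : Int) : Bool × (List (String × List (String × Int × Int))) :=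
  let N : Int := immagine.length
  let W : Int := (immagine.headD []).length   -- len(immagine[0]) if immagine else 0
  let nero : Int → Int → Bool :=
    if 1 ≤ b ∧ 1 ≤ h_ then
      let R := immagine.map (buildRow W)
      fun i j => (PySem.List.pyRange i (i + h_) 1).all
        (fun x => PySem.List.pyGetD (PySem.List.pyGetD R x []) (j + b) 0
               == PySem.List.pyGetD (PySem.List.pyGetD R x []) j 0)
    else fun _ _ => true    -- empty rectangle is vacuously all-black
  let d := (PySem.List.pyRange 0 (N - h_ + 1) 1).foldl
    (fun d i =>
      (PySem.List.pyRange 0 (W - b + 1) 1).foldl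
        (fun d j =>
          if nero i j && decide (j ≥ distanza) && decide (j + b - 1 ≤ W - distanza - 1) then
            dictSet d ("rettangolo_" ++ PySem.Int.toStr i ++ "_" ++ PySem.Int.toStr j) (crea_rettangolo i j b h_)
          else d) d)
    ([] : List (String × List (String × Int × Int)))
  (!d.isEmpty, d)

-- ===== PRECONDITION & SPEC =====

-- Pre_ excludes (a) immagine = [] with h_ ≤ 0, where A raises IndexError on
-- immagine[0], and (b) for b, h_ ≥ 1, images with a row shorter than the first
-- row: A happens to return on some of those by touching only the pixels before
-- its first non-black one, while B's prefix pass reads every row up to the first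
-- row's width and raises IndexError there.
def Pre_ricerca_rettangoli_neri (immagine : List (List (List Int))) (b : Int) (h_ : Int) (distanza : Int) : Prop :=
  (immagine ≠ [] ∨ 1 ≤ h_) ∧
  (1 ≤ b → 1 ≤ h_ → ∀ row ∈ immagine, (immagine.headD []).length ≤ row.length)
instance (immagine : List (List (List Int))) (b : Int) (h_ : Int) (distanza : Int) : Decidable (Pre_ricerca_rettangoli_neri immagine b h_ distanza) := by unfold Pre_ricerca_rettangoli_neri; infer_instance

def pvWitness_ricerca_rettangoli_neri : List (List (List Int)) × Int × Int × Int := ([[[1, 2, 3]]], 1, 1, 0)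

def Spec_ricerca_rettangoli_neri (immagine : List (List (List Int))) (b : Int) (h_ : Int) (distanza : Int) (out : Bool × (List (String × List (String × Int × Int)))) : Prop := out = ricerca_rettangoli_neri_alt immagine b h_ distanza
instance (immagine : List (List (List Int))) (b : Int) (h_ : Int) (distanza : Int) (out : Bool × (List (String × List (String × Int × Int)))) : Decidable (Spec_ricerca_rettangoli_neri immagine b h_ distanza out) := by unfold Spec_ricerca_rettangoli_neri; infer_instance

-- ===== CLAIM (what is proved, stated in full; the proofs are below) =====
def Claim_equal_ricerca_rettangoli_neri : Prop := ∀ (immagine : List (List (List Int))) (b : Int) (h_ : Int) (distanza : Int), Dom_ricerca_rettangoli_neri immagine b h_ distanza → Pre_ricerca_rettangoli_neri immagine b h_ distanza → Spec_ricerca_rettangoli_neri immagine b h_ distanza (ricerca_rettangoli_neri immagine b h_ distanza)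

-- ===== LEMMAS AND PROOFS =====

theorem dictSet_ne_nil {V : Type} (d : List (String × V)) (k : String) (v : V) :
    dictSet d k v ≠ [] := by
  cases d with
  | nil => simp [dictSet]
  | cons p t => unfold dictSet; split <;> simp

theorem rn_loopY_iff (immagine : List (List (List Int))) (x : Int) (L : List Int) :
    rn_loopY immagine x L = true ↔
      ∀ y ∈ L, PySem.List.pyGetD (PySem.List.pyGetD immagine x []) y [] = [0, 0, 0] := by
  induction L with
  | nil => simp [rn_loopY]
  | cons y ys ih =>
    unfold rn_loopY
    by_cases hp : PySem.List.pyGetD (PySem.List.pyGetD immagine x []) y ([] : List Int) = [0, 0, 0]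
    · simp only [hp]
      simp [ih, hp]
    · simp [hp]

theorem rn_loopX_iff (immagine : List (List (List Int))) (j b : Int) (L : List Int) :
    rn_loopX immagine j b L = true ↔
      ∀ x ∈ L, rn_loopY immagine x (PySem.List.pyRange j (j + b) 1) = true := by
  induction L with
  | nil => simp [rn_loopX]
  | cons x xs ih =>
    unfold rn_loopX
    by_cases hx : rn_loopY immagine x (PySem.List.pyRange j (j + b) 1) = true
    · simp [hx, ih]
    · simp [hx]

theorem rn_loopX_true (immagine : List (List (List Int))) (j b : Int) (hb : b ≤ 0) :
    ∀ L, rn_loopX immagine j b L = true := by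
  intro L
  rw [rn_loopX_iff]
  intro x _
  rw [PySem.List.pyRange_one_eq_nil (by omega)]
  rfl

theorem rettangolo_nero_true (immagine : List (List (List Int))) (i j b h : Int)
    (hbh : ¬ (1 ≤ b ∧ 1 ≤ h)) : rettangolo_nero immagine i j b h = true := by
  unfold rettangolo_nero
  by_cases hh : 1 ≤ h
  · exact rn_loopX_true immagine j b (by omega) _
  · rw [PySem.List.pyRange_one_eq_nil (by omega)]; rfl

-- A's scan, characterised with Nat indices and getD reads
theorem rn_char (immagine : List (List (List Int))) (b h_ : Int)
    (hb : 1 ≤ b) (hh : 1 ≤ h_) (i j : Nat) :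
    (rettangolo_nero immagine (i : Int) (j : Int) b h_ = true) ↔
      (∀ x < h_.toNat, ∀ y < b.toNat,
        ((immagine.getD (i + x) []).getD (j + y) ([] : List Int)) = [0, 0, 0]) := by
  unfold rettangolo_nero
  rw [rn_loopX_iff]
  constructor
  · intro hall x hx y hy
    have hmemx : ((i + x : Nat) : Int) ∈ PySem.List.pyRange (i : Int) ((i : Int) + h_) 1 := by
      rw [PySem.List.mem_pyRange_one]; constructor <;> omega
    have hmemy : ((j + y : Nat) : Int) ∈ PySem.List.pyRange (j : Int) ((j : Int) + b) 1 := by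
      rw [PySem.List.mem_pyRange_one]; constructor <;> omega
    have := (rn_loopY_iff immagine _ _).mp (hall _ hmemx) _ hmemy
    rwa [PySem.List.pyGetD_natCast, PySem.List.pyGetD_natCast] at this
  · intro hall x hxmem
    rw [PySem.List.mem_pyRange_one] at hxmem
    rw [rn_loopY_iff]
    intro y hymem
    rw [PySem.List.mem_pyRange_one] at hymem
    have hx' : x = ((i + (x.toNat - i) : Nat) : Int) := by omega
    have hy' : y = ((j + (y.toNat - j) : Nat) : Int) := by omega
    rw [hx', hy', PySem.List.pyGetD_natCast, PySem.List.pyGetD_natCast]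
    exact hall _ (by omega) _ (by omega)

-- ---- prefix-sum correctness for B ----

def nbPix (row : List (List Int)) (y : Nat) : Int :=
  if row.getD y ([] : List Int) = [0, 0, 0] then 0 else 1

def nbSum (row : List (List Int)) (k : Nat) : Int := ∑ y ∈ Finset.range k, nbPix row y

theorem nbPix_nonneg (row : List (List Int)) (y : Nat) : 0 ≤ nbPix row y := by
  unfold nbPix; split <;> omega

theorem buildRow_eq (row : List (List Int)) (W : Nat) :
    buildRow (W : Int) row = (List.range (W + 1)).map (nbSum row) := by
  unfold buildRow
  rw [PySem.List.pyRange_zero_nat, List.foldl_map]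
  induction W with
  | zero => simp [nbSum]
  | succ n ih =>
    rw [List.range_succ, List.foldl_append, ih, List.foldl_cons, List.foldl_nil]
    rw [List.range_succ (n := n + 1), List.map_append]
    congr 1
    -- the getD read of the running prefix list, and the appended value
    simp only [PySem.List.pyGetD_natCast]
    rw [List.getD_eq_getElem?_getD, List.getElem?_map,
      List.getElem?_range (by omega)]
    simp only [Option.map_some, Option.getD_some, List.map_cons, List.map_nil]
    congr 1
    rw [show nbSum row (n + 1) = nbSum row n + nbPix row n from Finset.sum_range_succ _ _]
    congr 1
    unfold nbPix
    split <;> simp_all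

theorem buildRow_getD (row : List (List Int)) (W k : Nat) (hk : k ≤ W) :
    (buildRow (W : Int) row).getD k 0 = nbSum row k := by
  rw [buildRow_eq, List.getD_eq_getElem?_getD, List.getElem?_map,
    List.getElem?_range (by omega)]
  simp

theorem seg_zero_iff (row : List (List Int)) (j bn : Nat) :
    (nbSum row (j + bn) = nbSum row j) ↔
      ∀ y < bn, row.getD (j + y) ([] : List Int) = [0, 0, 0] := by
  unfold nbSum
  rw [← Finset.sum_range_add_sum_Ico _ (Nat.le_add_right j bn)] at *
  constructor
  · intro hEq y hy
    have hz : ∑ y ∈ Finset.Ico j (j + bn), nbPix row y = 0 := by omega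
    have := (Finset.sum_eq_zero_iff_of_nonneg
      (fun y _ => nbPix_nonneg row y)).mp hz (j + y) (by
        rw [Finset.mem_Ico]; omega)
    unfold nbPix at this
    by_contra hne
    rw [if_neg hne] at this
    omega
  · intro hall
    have : ∑ y ∈ Finset.Ico j (j + bn), nbPix row y = 0 := by
      apply Finset.sum_eq_zero
      intro y hy
      rw [Finset.mem_Ico] at hy
      have : row.getD y ([] : List Int) = [0, 0, 0] := by
        have := hall (y - j) (by omega)
        rwa [Nat.add_sub_cancel' hy.1] at this
      unfold nbPix
      rw [if_pos this]
    omega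

-- the emptiness test B computes, characterised the same way
theorem nero_char (immagine : List (List (List Int))) (b h_ : Int)
    (hb : 1 ≤ b) (hh : 1 ≤ h_) (i j : Nat)
    (hi : i + h_.toNat ≤ immagine.length)
    (hj : j + b.toNat ≤ (immagine.headD []).length) :
    ((PySem.List.pyRange (i : Int) ((i : Int) + h_) 1).all
        (fun x => PySem.List.pyGetD (PySem.List.pyGetD (immagine.map (buildRow ((immagine.headD []).length : Int))) x []) ((j : Int) + b) 0
               == PySem.List.pyGetD (PySem.List.pyGetD (immagine.map (buildRow ((immagine.headD []).length : Int))) x []) (j : Int) 0) = true) ↔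
      (∀ x < h_.toNat, ∀ y < b.toNat,
        ((immagine.getD (i + x) []).getD (j + y) ([] : List Int)) = [0, 0, 0]) := by
  rw [List.all_eq_true]
  constructor
  · intro hall x hx y hy
    have hmem : ((i + x : Nat) : Int) ∈ PySem.List.pyRange (i : Int) ((i : Int) + h_) 1 := by
      rw [PySem.List.mem_pyRange_one]
      constructor <;> omega
    have := hall _ hmem
    rw [beq_iff_eq] at this
    -- reduce the pyGetD reads
    rw [PySem.List.pyGetD_natCast] at this
    rw [List.getD_eq_getElem?_getD, List.getElem?_map] at this
    rw [List.getElem?_eq_getElem (by omega)] at this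
    simp only [Option.map_some, Option.getD_some] at this
    have hcast1 : ((j : Int) + b) = ((j + b.toNat : Nat) : Int) := by push_cast; omega
    rw [hcast1, PySem.List.pyGetD_natCast, PySem.List.pyGetD_natCast] at this
    rw [buildRow_getD _ _ _ (by omega), buildRow_getD _ _ _ (by omega)] at this
    have hseg := (seg_zero_iff (immagine[i + x]) j b.toNat).mp this y hy
    have hrow : immagine.getD (i + x) [] = immagine[i + x]'(by omega) := by
      rw [List.getD_eq_getElem?_getD, List.getElem?_eq_getElem (by omega), Option.getD_some]
    rw [hrow]
    exact hseg
  · intro hall x hxmem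
    rw [PySem.List.mem_pyRange_one] at hxmem
    obtain ⟨hx1, hx2⟩ := hxmem
    have hxn : x = ((x.toNat : Nat) : Int) := by omega
    rw [beq_iff_eq, hxn, PySem.List.pyGetD_natCast]
    rw [List.getD_eq_getElem?_getD, List.getElem?_map]
    rw [List.getElem?_eq_getElem (by omega)]
    simp only [Option.map_some, Option.getD_some]
    have hcast1 : ((j : Int) + b) = ((j + b.toNat : Nat) : Int) := by push_cast; omega
    rw [hcast1, PySem.List.pyGetD_natCast, PySem.List.pyGetD_natCast]
    rw [buildRow_getD _ _ _ (by omega), buildRow_getD _ _ _ (by omega)]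
    apply (seg_zero_iff (immagine[x.toNat]) j b.toNat).mpr
    intro y hy
    have h1 := hall (x.toNat - i) (by omega) y hy
    rw [show i + (x.toNat - i) = x.toNat by omega] at h1
    have hrow : immagine.getD x.toNat [] = immagine[x.toNat]'(by omega) := by
      rw [List.getD_eq_getElem?_getD, List.getElem?_eq_getElem (by omega), Option.getD_some]
    rw [hrow] at h1
    exact h1

-- generic: A's (flag, dict) fold tracks B's dict fold, the flag being "dict nonempty"
theorem foldl_rel_mem {α δ : Type} (P : δ → Bool) (aStep : (Bool × δ) → α → Bool × δ)
    (bStep : δ → α → δ) (L : List α)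
    (hstep : ∀ d x, x ∈ L → aStep (P d, d) x = (P (bStep d x), bStep d x)) :
    ∀ (d : δ), L.foldl aStep (P d, d) = (P (L.foldl bStep d), L.foldl bStep d) := by
  induction L with
  | nil => intro d; rfl
  | cons x xs ih =>
    intro d
    rw [List.foldl_cons, hstep d x (by simp), List.foldl_cons]
    exact ih (fun d y hy => hstep d y (by simp [hy])) _

-- A's two nested ifs as one condition
theorem ite_ite_and {δ : Type} (a b : Bool) (X s : δ) :
    (if a then (if b then X else s) else s) = if a && b then X else s := by
  cases a <;> cases b <;> simp

-- main equality, for any b, h_ (the ports are total; Pre_ only matters in Python)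
theorem ports_agree (immagine : List (List (List Int))) (b h_ distanza : Int) :
    ricerca_rettangoli_neri immagine b h_ distanza = ricerca_rettangoli_neri_alt immagine b h_ distanza := by
  unfold ricerca_rettangoli_neri ricerca_rettangoli_neri_alt
  dsimp only
  simp only [ite_ite_and]
  have hmain :
      ∀ nero : Int → Int → Bool,
      (∀ i, 0 ≤ i → i < (immagine.length : Int) - h_ + 1 →
       ∀ j, 0 ≤ j → j < ((immagine.headD []).length : Int) - b + 1 →
        nero i j = rettangolo_nero immagine i j b h_) →
      (PySem.List.pyRange 0 ((immagine.length : Int) - h_ + 1) 1).foldl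
        (fun s i =>
          (PySem.List.pyRange 0 (((immagine.headD []).length : Int) - b + 1) 1).foldl
            (fun s j =>
              if rettangolo_nero immagine i j b h_ && (decide (j ≥ distanza) && decide (j + b - 1 ≤ ((immagine.headD []).length : Int) - distanza - 1)) then
                (true, dictSet s.2 ("rettangolo_" ++ PySem.Int.toStr i ++ "_" ++ PySem.Int.toStr j) (crea_rettangolo i j b h_))
              else s) s)
        (false, ([] : List (String × List (String × Int × Int)))) =
      (!((PySem.List.pyRange 0 ((immagine.length : Int) - h_ + 1) 1).foldl
        (fun d i =>
          (PySem.List.pyRange 0 (((immagine.headD []).length : Int) - b + 1) 1).foldl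
            (fun d j =>
              if nero i j && decide (j ≥ distanza) && decide (j + b - 1 ≤ ((immagine.headD []).length : Int) - distanza - 1) then
                dictSet d ("rettangolo_" ++ PySem.Int.toStr i ++ "_" ++ PySem.Int.toStr j) (crea_rettangolo i j b h_)
              else d) d)
        ([] : List (String × List (String × Int × Int)))).isEmpty,
       (PySem.List.pyRange 0 ((immagine.length : Int) - h_ + 1) 1).foldl
        (fun d i =>
          (PySem.List.pyRange 0 (((immagine.headD []).length : Int) - b + 1) 1).foldl
            (fun d j =>
              if nero i j && decide (j ≥ distanza) && decide (j + b - 1 ≤ ((immagine.headD []).length : Int) - distanza - 1) then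
                dictSet d ("rettangolo_" ++ PySem.Int.toStr i ++ "_" ++ PySem.Int.toStr j) (crea_rettangolo i j b h_)
              else d) d)
        ([] : List (String × List (String × Int × Int)))) := by
    intro nero hnero
    have h0 : ((false : Bool), ([] : List (String × List (String × Int × Int)))) =
        (!(List.isEmpty ([] : List (String × List (String × Int × Int)))), ([] : List (String × List (String × Int × Int)))) := by
      rfl
    rw [h0]
    refine foldl_rel_mem (fun d => !d.isEmpty) _ _ _ ?_ []
    intro d i hi
    refine foldl_rel_mem (fun d => !d.isEmpty) _ _ _ ?_ d
    intro d' j hj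
    rw [PySem.List.mem_pyRange_one] at hi hj
    rw [hnero i hi.1 hi.2 j hj.1 hj.2, Bool.and_assoc]
    by_cases hc : (rettangolo_nero immagine i j b h_ && (decide (j ≥ distanza) && decide (j + b - 1 ≤ ((immagine.headD []).length : Int) - distanza - 1))) = true
    · rw [if_pos hc, if_pos hc]
      have hne : (dictSet d' ("rettangolo_" ++ PySem.Int.toStr i ++ "_" ++ PySem.Int.toStr j) (crea_rettangolo i j b h_)).isEmpty = false := by
        rw [List.isEmpty_eq_false_iff]
        exact dictSet_ne_nil _ _ _
      simp only []
      rw [hne]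
      rfl
    · rw [if_neg hc, if_neg hc]
  by_cases hbh : (1 : Int) ≤ b ∧ (1 : Int) ≤ h_
  · rw [if_pos hbh]
    apply hmain
    intro i hi0 hiN j hj0 hjW
    have hi' : i = ((i.toNat : Nat) : Int) := by omega
    have hj' : j = ((j.toNat : Nat) : Int) := by omega
    rw [hi', hj']
    rw [Bool.eq_iff_iff]
    rw [nero_char immagine b h_ hbh.1 hbh.2 i.toNat j.toNat (by omega) (by omega)]
    rw [rn_char immagine b h_ hbh.1 hbh.2 i.toNat j.toNat]
  · rw [if_neg hbh]
    apply hmain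
    intro i _ _ j _ _
    exact (rettangolo_nero_true immagine i j b h_ hbh).symm

-- ===== VERDICT (by name: the statement is the Claim_ definition above) =====
theorem ricerca_rettangoli_neri_spec : Claim_equal_ricerca_rettangoli_neri := by
  intro immagine b h_ distanza hDom hPre
  exact ports_agree immagine b h_ distanza
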